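-- pv_equiv track=rewrite | github.com/pypi-data/pypi-mirror-401 | packages/sqlite-mcp-server-enhanced/sqlite_mcp_server_enhanced-2.6.5.tar.gz/sqlite_mcp_server_enhanced-2.6.5/src/mcp_server_sqlite/json_helpers.py | create_intermediate_paths
-- ===== SOURCE A (Python) =====
-- from typing import Any, Dict, List, Optional, Union, Tuple
--
-- def create_intermediate_paths(path: str) -> List[str]:
--     """
--     Generate intermediate paths for creating nested JSON structures.
--
--     Args:
--         path: Target JSON path
--
--     Returns:
--         List of paths from root to target
--     """
--     if not path.startswith('$'):
--         return []
--
--     parts = path[1:].split('.')  # Remove $ and split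
--     paths = ['$']
--
--     current_path = '$'
--     for part in parts:
--         if part:  # Skip empty parts
--             current_path += f'.{part}'
--             paths.append(current_path)
--
--     return paths
-- ===== SOURCE B (Python) =====
-- def create_intermediate_paths(path: str):
--     if not path.startswith('$'):
--         return []
--     toks = [p for p in path[1:].split('.') if p]
--     return ['$'] + ['$.' + '.'.join(toks[:i + 1]) for i in range(len(toks))]
-- ===== Notes on version B (the rewrite author's own statement) =====
-- stated objective: simpler
-- what changed: Replaces the accumulator-carrying loop (a running current-path string extended in place while being appended to a growing list) by first filtering the non-empty tokens and then rebuilding each intermediate path independently by joining a cumulative slice of the token list.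
import Mathlib
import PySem

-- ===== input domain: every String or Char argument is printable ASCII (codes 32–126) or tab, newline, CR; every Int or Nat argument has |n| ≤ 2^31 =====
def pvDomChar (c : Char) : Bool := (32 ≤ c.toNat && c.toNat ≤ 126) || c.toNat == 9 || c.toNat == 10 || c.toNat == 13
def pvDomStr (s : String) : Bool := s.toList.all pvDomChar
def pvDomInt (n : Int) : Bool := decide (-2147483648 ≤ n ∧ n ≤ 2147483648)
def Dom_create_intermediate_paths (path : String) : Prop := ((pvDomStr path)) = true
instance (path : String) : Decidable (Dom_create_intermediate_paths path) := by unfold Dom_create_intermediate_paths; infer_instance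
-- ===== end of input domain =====

-- B replaces A's accumulator loop by filtering tokens and rebuilding each path from a cumulative slice (objective: simpler).
-- Both ports work on code points (List Char) via PySem.Chars, exact for the string operations used.

-- ===== PORT A =====
-- loop body of A: if part: current_path += '.' + part; paths.append(current_path)
def pvStepA (st : List (List Char) × List Char) (part : List Char) : List (List Char) × List Char :=
  if part ≠ [] then (st.1 ++ [st.2 ++ '.' :: part], st.2 ++ '.' :: part) else st

def create_intermediate_paths (path : String) : List String :=
  if PySem.Str.startswith path "$" = false then []
  else
    let parts := PySem.Chars.splitOn (PySem.List.slice path.toList (some 1) none) ['.']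
    let st := parts.foldl pvStepA ([['$']], ['$'])
    st.1.map String.ofList

-- ===== PORT B =====
def create_intermediate_paths_alt (path : String) : List String :=
  if PySem.Str.startswith path "$" = false then []
  else
    let toks := (PySem.Chars.splitOn (PySem.List.slice path.toList (some 1) none) ['.']).filter (· ≠ [])
    String.ofList ['$'] ::
      (List.range toks.length).map (fun (i : Nat) =>
        String.ofList ('$' :: '.' :: PySem.Chars.join ['.'] (PySem.List.slice toks none (some ((i : Int) + 1)))))

-- ===== PRECONDITION & SPEC =====
def Spec_create_intermediate_paths (path : String) (out : List String) : Prop := out = create_intermediate_paths_alt path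
instance (path : String) (out : List String) : Decidable (Spec_create_intermediate_paths path out) := by unfold Spec_create_intermediate_paths; infer_instance

-- ===== CLAIM (what is proved, stated in full; the proofs are below) =====
def Claim_equal_create_intermediate_paths : Prop := ∀ (path : String), Dom_create_intermediate_paths path → Spec_create_intermediate_paths path (create_intermediate_paths path)

-- ===== LEMMAS AND PROOFS =====

lemma pv_foldA (parts : List (List Char)) (ps : List (List Char)) (cur : List Char) :
    (parts.foldl pvStepA (ps, cur)).1
      = ps ++ (List.range (parts.filter (· ≠ [])).length).map
          (fun i => cur ++ '.' :: PySem.Chars.join ['.'] ((parts.filter (· ≠ [])).take (i + 1))) := by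
  induction parts generalizing ps cur with
  | nil => simp
  | cons p rest ih =>
    by_cases hp : p = []
    · subst hp
      simpa [pvStepA] using ih ps cur
    · have hstep : pvStepA (ps, cur) p = (ps ++ [cur ++ '.' :: p], cur ++ '.' :: p) := by
        simp [pvStepA, hp]
      rw [List.foldl_cons, hstep, ih]
      have hfilter : (p :: rest).filter (· ≠ []) = p :: rest.filter (· ≠ []) := by
        simp [hp]
      rw [hfilter]
      set r := rest.filter (· ≠ []) with hr
      have hmap : List.map (fun i => cur ++ '.' :: PySem.Chars.join ['.'] (p :: List.take (i + 1) r)) (List.range r.length)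
          = List.map (fun i => cur ++ '.' :: p ++ '.' :: PySem.Chars.join ['.'] (List.take (i + 1) r)) (List.range r.length) := by
        apply List.map_congr_left
        intro i hi
        rw [List.mem_range] at hi
        obtain ⟨b, l, hb⟩ : ∃ b l, List.take (i + 1) r = b :: l := by
          cases hr' : List.take (i + 1) r with
          | nil =>
            rcases List.take_eq_nil_iff.mp hr' with h | h
            · exact absurd h (by omega)
            · rw [h] at hi; simp at hi
          | cons b l => exact ⟨b, l, rfl⟩
        rw [hb, PySem.Chars.join_cons_cons]
        simp
      simp only [List.length_cons, List.range_succ_eq_map, List.map_cons, List.map_map,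
        Function.comp_def, Nat.succ_eq_add_one, List.take_succ_cons, List.take_zero]
      rw [hmap, PySem.Chars.join_singleton]
      simp

theorem create_intermediate_paths_spec : Claim_equal_create_intermediate_paths := by
  intro path _
  unfold Spec_create_intermediate_paths create_intermediate_paths create_intermediate_paths_alt
  by_cases h : PySem.Str.startswith path "$" = false
  · have h' : PySem.Chars.startswith path.toList ['$'] = false := by simpa using h
    simp [h']
  · simp only [h]
    rw [pv_foldA]
    have hsl : ∀ (toks : List (List Char)) (i : Nat),
        PySem.List.slice toks none (some ((i : Int) + 1)) = toks.take (i + 1) := by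
      intro toks i
      have : ((i : Int) + 1) = ((i + 1 : Nat) : Int) := by push_cast; ring
      rw [this, PySem.List.slice_to_natCast]
    simp only [List.singleton_append, List.map_cons, List.map_map]
    simp only [hsl, Function.comp_def]
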